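-- pv_equiv track=rewrite | github.com/chasezimmy/fun | ancestor_in_tree/ancestor_in_tree.py | parent_child
-- ===== SOURCE A (Python) =====
-- def parent_child(arr):
-- 	relationship = {}
--
-- 	for n in arr:
-- 		if n[0] not in relationship:
-- 			relationship[n[0]] = {'parent': 1, 'child' : 0}
-- 		else:
-- 			relationship[n[0]]['parent'] += 1
--
-- 		if n[1] not in relationship:
-- 			relationship[n[1]] = {'parent': 0, 'child' : 1}
-- 		else:
-- 			relationship[n[1]]['child'] += 1
--
-- 	return relationship
-- ===== SOURCE B (Python) =====
-- def parent_child(arr):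
--     parents = {}
--     for n in arr:
--         parents[n[0]] = parents.get(n[0], 0) + 1
--     children = {}
--     for n in arr:
--         children[n[1]] = children.get(n[1], 0) + 1
--     nodes = dict.fromkeys(x for n in arr for x in n)
--     return {node: {'parent': parents.get(node, 0), 'child': children.get(node, 0)}
--             for node in nodes}
-- ===== Notes on version B (the rewrite author's own statement) =====
-- stated objective: alternative
-- what changed: A's single interleaved loop that creates/mutates a nested per-node dict with presence checks is replaced by two separate counting passes (parent counts over n[0], child counts over n[1]) plus one dedup pass for first-appearance node order, merged in a final tabulation.
import Mathlib
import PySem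

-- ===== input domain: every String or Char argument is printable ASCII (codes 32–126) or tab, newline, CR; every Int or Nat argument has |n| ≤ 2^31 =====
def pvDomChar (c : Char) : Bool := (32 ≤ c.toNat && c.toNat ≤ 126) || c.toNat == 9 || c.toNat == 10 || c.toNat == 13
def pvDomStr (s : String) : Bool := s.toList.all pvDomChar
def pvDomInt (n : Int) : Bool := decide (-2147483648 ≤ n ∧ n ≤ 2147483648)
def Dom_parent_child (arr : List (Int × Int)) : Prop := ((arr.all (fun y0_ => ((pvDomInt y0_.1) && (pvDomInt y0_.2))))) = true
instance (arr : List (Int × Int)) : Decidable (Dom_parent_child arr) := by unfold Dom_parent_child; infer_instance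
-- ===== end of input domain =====

-- B replaces A's single interleaved loop (per-node nested-dict mutation with presence checks) by
-- two count tables built in separate passes plus one dedup pass for node order (objective: alternative decomposition).

-- ===== PORT A =====
-- literal transliteration of A: one loop; nested dict; 'relationship[n[0]]["parent"] += 1'
-- is Dict.modify on the outer key (exact here: the key is present — the branch guarantees it,
-- and the inner dict always carries both "parent" and "child").
def parent_child (arr : List (Int × Int)) : List (Int × List (String × Int)) :=
  let relationship :=
    arr.foldl (fun relationship n =>
      let relationship :=
        if relationship.contains n.1 = false then
          relationship.insert n.1 (PySem.Dict.ofList [("parent", (1 : Int)), ("child", 0)])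
        else
          relationship.modify n.1 PySem.Dict.empty (fun m => m.modify "parent" 0 (· + 1))
      if relationship.contains n.2 = false then
        relationship.insert n.2 (PySem.Dict.ofList [("parent", (0 : Int)), ("child", 1)])
      else
        relationship.modify n.2 PySem.Dict.empty (fun m => m.modify "child" 0 (· + 1)))
      PySem.Dict.empty
  relationship.items.map (fun p => (p.1, p.2.items))

-- ===== PORT B =====
-- transliteration of Source B: two counting passes, one dedup pass, then tabulate.
def parent_child_alt (arr : List (Int × Int)) : List (Int × List (String × Int)) :=
  let parents := arr.foldl (fun d n => d.insert n.1 (d.getD n.1 0 + 1)) PySem.Dict.empty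
  let children := arr.foldl (fun d n => d.insert n.2 (d.getD n.2 0 + 1)) PySem.Dict.empty
  let nodes := PySem.List.dedup (arr.flatMap (fun n => [n.1, n.2]))
  nodes.map (fun node => (node, [("parent", parents.getD node 0), ("child", children.getD node 0)]))

-- ===== PRECONDITION & SPEC =====
def Spec_parent_child (arr : List (Int × Int)) (out : List (Int × List (String × Int))) : Prop := out = parent_child_alt arr
instance (arr : List (Int × Int)) (out : List (Int × List (String × Int))) : Decidable (Spec_parent_child arr out) := by unfold Spec_parent_child; infer_instance

-- ===== CLAIM (what is proved, stated in full; the proofs are below) =====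
def Claim_equal_parent_child : Prop := ∀ (arr : List (Int × Int)), Dom_parent_child arr → Spec_parent_child arr (parent_child arr)

-- ===== LEMMAS AND PROOFS =====

-- the inner dict: it always has exactly the keys "parent", "child", in that order
def pvInner (p c : Int) : PySem.Dict String Int := PySem.Dict.mk [("parent", p), ("child", c)]

-- A's two half-steps (processing n[0] as a parent, n[1] as a child)
def pvOpP (d : PySem.Dict Int (PySem.Dict String Int)) (a : Int) : PySem.Dict Int (PySem.Dict String Int) :=
  if d.contains a = false then d.insert a (pvInner 1 0)
  else d.modify a PySem.Dict.empty (fun m => m.modify "parent" 0 (· + 1))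

def pvOpC (d : PySem.Dict Int (PySem.Dict String Int)) (b : Int) : PySem.Dict Int (PySem.Dict String Int) :=
  if d.contains b = false then d.insert b (pvInner 0 1)
  else d.modify b PySem.Dict.empty (fun m => m.modify "child" 0 (· + 1))

def pvToks (arr : List (Int × Int)) : List Int := arr.flatMap (fun n => [n.1, n.2])

lemma pvInner_bump_parent (p c : Int) :
    (pvInner p c).modify "parent" 0 (· + 1) = pvInner (p + 1) c := rfl

lemma pvInner_bump_child (p c : Int) :
    (pvInner p c).modify "child" 0 (· + 1) = pvInner p (c + 1) := rfl

lemma pvOpP_inv (d : PySem.Dict Int (PySem.Dict String Int)) (t : List Int) (p c : Int → Int)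
    (hk : d.keys = PySem.Set.ofList t)
    (hv : ∀ k, d.getD k PySem.Dict.empty = if k ∈ t then pvInner (p k) (c k) else PySem.Dict.empty)
    (hz : ∀ k, k ∉ t → p k = 0 ∧ c k = 0) (a : Int) :
    (pvOpP d a).keys = PySem.Set.ofList (t ++ [a]) ∧
    ∀ k, (pvOpP d a).getD k PySem.Dict.empty =
      if k ∈ t ++ [a] then pvInner (p k + if k = a then 1 else 0) (c k) else PySem.Dict.empty := by
  have hcont : d.contains a = decide (a ∈ t) := by
    rw [PySem.Dict.contains_eq_decide_mem_keys, hk]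
    simp [PySem.Set.mem_ofList]
  by_cases hmem : a ∈ t
  · have hc : d.contains a = true := by simp [hcont, hmem]
    have hstep : pvOpP d a = d.modify a PySem.Dict.empty (fun m => m.modify "parent" 0 (· + 1)) := by
      unfold pvOpP; rw [hc]; exact if_neg (by simp)
    refine ⟨?_, ?_⟩
    · rw [hstep, PySem.Dict.keys_modify, PySem.Dict.keys_insert_of_contains _ _ hc, hk,
        PySem.Set.ofList_append_singleton,
        PySem.Set.add_of_mem (by simpa [PySem.Set.mem_ofList] using hmem)]
    · intro k
      rw [hstep, PySem.Dict.getD_modify]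
      by_cases hka : k = a
      · subst hka
        simp [hv k, hmem, pvInner_bump_parent]
      · simp [hka, hv k]
  · have hc : d.contains a = false := by simp [hcont, hmem]
    have hstep : pvOpP d a = d.insert a (pvInner 1 0) := by unfold pvOpP; rw [hc]; exact if_pos rfl
    refine ⟨?_, ?_⟩
    · rw [hstep, PySem.Dict.keys_insert_of_not_contains _ _ hc, hk,
        PySem.Set.ofList_append_singleton,
        PySem.Set.add_of_not_mem (by simpa [PySem.Set.mem_ofList] using hmem)]
    · intro k
      rw [hstep, PySem.Dict.getD_insert]
      by_cases hka : k = a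
      · subst hka
        simp [hmem, (hz k hmem).1, (hz k hmem).2, pvInner]
      · simp [hka, hv k]

lemma pvOpC_inv (d : PySem.Dict Int (PySem.Dict String Int)) (t : List Int) (p c : Int → Int)
    (hk : d.keys = PySem.Set.ofList t)
    (hv : ∀ k, d.getD k PySem.Dict.empty = if k ∈ t then pvInner (p k) (c k) else PySem.Dict.empty)
    (hz : ∀ k, k ∉ t → p k = 0 ∧ c k = 0) (b : Int) :
    (pvOpC d b).keys = PySem.Set.ofList (t ++ [b]) ∧
    ∀ k, (pvOpC d b).getD k PySem.Dict.empty =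
      if k ∈ t ++ [b] then pvInner (p k) (c k + if k = b then 1 else 0) else PySem.Dict.empty := by
  have hcont : d.contains b = decide (b ∈ t) := by
    rw [PySem.Dict.contains_eq_decide_mem_keys, hk]
    simp [PySem.Set.mem_ofList]
  by_cases hmem : b ∈ t
  · have hc : d.contains b = true := by simp [hcont, hmem]
    have hstep : pvOpC d b = d.modify b PySem.Dict.empty (fun m => m.modify "child" 0 (· + 1)) := by
      unfold pvOpC; rw [hc]; exact if_neg (by simp)
    refine ⟨?_, ?_⟩
    · rw [hstep, PySem.Dict.keys_modify, PySem.Dict.keys_insert_of_contains _ _ hc, hk,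
        PySem.Set.ofList_append_singleton,
        PySem.Set.add_of_mem (by simpa [PySem.Set.mem_ofList] using hmem)]
    · intro k
      rw [hstep, PySem.Dict.getD_modify]
      by_cases hkb : k = b
      · subst hkb
        simp [hv k, hmem, pvInner_bump_child]
      · simp [hkb, hv k]
  · have hc : d.contains b = false := by simp [hcont, hmem]
    have hstep : pvOpC d b = d.insert b (pvInner 0 1) := by unfold pvOpC; rw [hc]; exact if_pos rfl
    refine ⟨?_, ?_⟩
    · rw [hstep, PySem.Dict.keys_insert_of_not_contains _ _ hc, hk,
        PySem.Set.ofList_append_singleton,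
        PySem.Set.add_of_not_mem (by simpa [PySem.Set.mem_ofList] using hmem)]
    · intro k
      rw [hstep, PySem.Dict.getD_insert]
      by_cases hkb : k = b
      · subst hkb
        simp [hmem, (hz k hmem).1, (hz k hmem).2, pvInner]
      · simp [hkb, hv k]

lemma mem_fst_toks {arr : List (Int × Int)} {k : Int} (h : k ∈ arr.map (·.1)) : k ∈ pvToks arr := by
  simp only [pvToks, List.mem_flatMap, List.mem_map] at *
  obtain ⟨n, hn, hk⟩ := h
  exact ⟨n, hn, by simp [hk]⟩

lemma mem_snd_toks {arr : List (Int × Int)} {k : Int} (h : k ∈ arr.map (·.2)) : k ∈ pvToks arr := by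
  simp only [pvToks, List.mem_flatMap, List.mem_map] at *
  obtain ⟨n, hn, hk⟩ := h
  exact ⟨n, hn, by simp [hk]⟩

-- the invariant of A's loop
lemma pvFold_inv (arr : List (Int × Int)) :
    (arr.foldl (fun d n => pvOpC (pvOpP d n.1) n.2) PySem.Dict.empty).keys
        = PySem.Set.ofList (pvToks arr) ∧
    ∀ k, (arr.foldl (fun d n => pvOpC (pvOpP d n.1) n.2) PySem.Dict.empty).getD k PySem.Dict.empty
        = if k ∈ pvToks arr
          then pvInner (((arr.map (·.1)).count k : Int)) (((arr.map (·.2)).count k : Int))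
          else PySem.Dict.empty := by
  induction arr using List.reverseRecOn with
  | nil => exact ⟨rfl, fun k => by simp [pvToks, PySem.Dict.getD_empty]⟩
  | append_singleton arr e ih =>
    obtain ⟨hk, hv⟩ := ih
    have hzp : ∀ k, k ∉ pvToks arr →
        ((arr.map (·.1)).count k : Int) = 0 ∧ ((arr.map (·.2)).count k : Int) = 0 := by
      intro k hkm
      have h1 : k ∉ arr.map (·.1) := fun hc => hkm (mem_fst_toks hc)
      have h2 : k ∉ arr.map (·.2) := fun hc => hkm (mem_snd_toks hc)
      simp [List.count_eq_zero.mpr h1, List.count_eq_zero.mpr h2]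
    have hP := pvOpP_inv _ (pvToks arr) _ _ hk hv hzp e.1
    have hzc : ∀ k, k ∉ pvToks arr ++ [e.1] →
        (((arr.map (·.1)).count k : Int) + if k = e.1 then 1 else 0) = 0 ∧
          ((arr.map (·.2)).count k : Int) = 0 := by
      intro k hkm
      rw [List.mem_append] at hkm
      push Not at hkm
      have hne : k ≠ e.1 := by simpa using hkm.2
      have := hzp k hkm.1
      simp [hne, this.1, this.2]
    have hC := pvOpC_inv _ (pvToks arr ++ [e.1]) _ _ hP.1 hP.2 hzc e.2
    have htoks : pvToks (arr ++ [e]) = (pvToks arr ++ [e.1]) ++ [e.2] := by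
      simp [pvToks]
    refine ⟨?_, ?_⟩
    · rw [List.foldl_append, List.foldl_cons, List.foldl_nil, hC.1, htoks]
    · intro k
      rw [List.foldl_append, List.foldl_cons, List.foldl_nil, hC.2 k, htoks]
      by_cases hmem : k ∈ (pvToks arr ++ [e.1]) ++ [e.2]
      · simp only [hmem, if_pos]
        have h1 : (((arr ++ [e]).map (·.1)).count k : Int)
            = ((arr.map (·.1)).count k : Int) + if k = e.1 then 1 else 0 := by
          rcases eq_or_ne k e.1 with h | h
          · subst h; simp [List.count_append]
          · simp [List.count_append, Ne.symm h, h]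
        have h2 : (((arr ++ [e]).map (·.2)).count k : Int)
            = ((arr.map (·.2)).count k : Int) + if k = e.2 then 1 else 0 := by
          rcases eq_or_ne k e.2 with h | h
          · subst h; simp [List.count_append]
          · simp [List.count_append, Ne.symm h, h]
        rw [h1, h2]
      · rw [if_neg hmem, if_neg hmem]

-- A's step function is literally pvOpC ∘ pvOpP
lemma pvStep_eq (d : PySem.Dict Int (PySem.Dict String Int)) (n : Int × Int) :
    (let d' := if d.contains n.1 = false then
          d.insert n.1 (PySem.Dict.ofList [("parent", (1 : Int)), ("child", 0)])
        else d.modify n.1 PySem.Dict.empty (fun m => m.modify "parent" 0 (· + 1));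
      if d'.contains n.2 = false then
        d'.insert n.2 (PySem.Dict.ofList [("parent", (0 : Int)), ("child", 1)])
      else d'.modify n.2 PySem.Dict.empty (fun m => m.modify "child" 0 (· + 1)))
    = pvOpC (pvOpP d n.1) n.2 := rfl

-- ===== VERDICT (by name: the statement is the Claim_ definition above) =====
theorem parent_child_spec : Claim_equal_parent_child := by
  intro arr _
  unfold Spec_parent_child parent_child parent_child_alt
  simp only [pvStep_eq]
  obtain ⟨hk, hv⟩ := pvFold_inv arr
  have hnodup : (arr.foldl (fun d n => pvOpC (pvOpP d n.1) n.2) PySem.Dict.empty).keys.Nodup := by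
    rw [hk]; exact PySem.Set.nodup_ofList _
  rw [PySem.Dict.items_eq_map_keys _ hnodup PySem.Dict.empty, hk]
  have hded : PySem.List.dedup (arr.flatMap (fun n => [n.1, n.2])) = PySem.Set.ofList (pvToks arr) := rfl
  rw [hded, List.map_map]
  apply List.map_congr_left
  intro k hkmem
  have hkt : k ∈ pvToks arr := by simpa [PySem.Set.mem_ofList] using hkmem
  simp only [Function.comp, hv k, if_pos hkt]
  have hrw1 : List.foldl (fun (d : PySem.Dict Int Int) x => d.insert x (d.getD x 0 + 1))
        PySem.Dict.empty (arr.map (·.1))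
      = List.foldl (fun d n => d.insert n.1 (d.getD n.1 0 + 1)) PySem.Dict.empty arr :=
    List.foldl_map
  have hp : (arr.foldl (fun d n => d.insert n.1 (d.getD n.1 0 + 1)) PySem.Dict.empty).getD k 0
      = ((arr.map (·.1)).count k : Int) := by
    rw [← hrw1, PySem.Dict.getD_foldl_insert_add_one, PySem.Dict.getD_empty]
    ring
  have hrw2 : List.foldl (fun (d : PySem.Dict Int Int) x => d.insert x (d.getD x 0 + 1))
        PySem.Dict.empty (arr.map (·.2))
      = List.foldl (fun d n => d.insert n.2 (d.getD n.2 0 + 1)) PySem.Dict.empty arr :=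
    List.foldl_map
  have hc : (arr.foldl (fun d n => d.insert n.2 (d.getD n.2 0 + 1)) PySem.Dict.empty).getD k 0
      = ((arr.map (·.2)).count k : Int) := by
    rw [← hrw2, PySem.Dict.getD_foldl_insert_add_one, PySem.Dict.getD_empty]
    ring
  rw [hp, hc]
  rfl
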